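-- pv_equiv track=rewrite | github.com/spacekay/space-cowguy | week4_q1.py | comma_maker
-- ===== SOURCE A (Python) =====
-- def comma_maker(n):
--     new_num = ""
--     # 받아들인 문자열의 길이를 측정하여 이후 알고리즘의 주요 도구로 삼는다.
--     length = len(n)
--     if length % 3 == 0:
--         for i in range(0, length):
--             if i == 2:
--                 new_num = n[0:3]
--             elif i % 3 == 0 and i != 0:
--                 new_num = new_num + "," + n[i:i+3]
--                 # 파이썬에서 [m:n]은 m 이상 n '미만'의 인덱스를 의미
--     elif length % 3 == 1:
--         for i in range(0, length):
--             if i == 0: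
--                 new_num = n[0]
--             elif (i+2) % 3 == 0:
--                 new_num = new_num + "," + n[i:i+3]
--     else:
--         for i in range(0, length):
--             if i == 1:
--                 new_num = n[0:2]
--             elif (i+1) % 3 == 0:
--                 new_num = new_num + "," + n[i:i+3]
--     # 결과는 str로 return한다.
--     return new_num
-- ===== SOURCE B (Python) =====
-- def comma_maker(n):
--     chunks = []
--     while len(n) > 3:
--         chunks.append(n[-3:])
--         n = n[:-3]
--     chunks.append(n)
--     return ",".join(reversed(chunks))
-- ===== Notes on version B (the rewrite author's own statement) =====
-- stated objective: simpler
-- what changed: Replaced A's three separate length%3-indexed left-to-right loops (each testing a mod-3 condition at every index and slicing on hits) by one uniform right-to-left grouping pass that repeatedly peels the last three characters into a chunk and then joins the chunks, reversed, with the comma separator.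
import Mathlib
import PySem

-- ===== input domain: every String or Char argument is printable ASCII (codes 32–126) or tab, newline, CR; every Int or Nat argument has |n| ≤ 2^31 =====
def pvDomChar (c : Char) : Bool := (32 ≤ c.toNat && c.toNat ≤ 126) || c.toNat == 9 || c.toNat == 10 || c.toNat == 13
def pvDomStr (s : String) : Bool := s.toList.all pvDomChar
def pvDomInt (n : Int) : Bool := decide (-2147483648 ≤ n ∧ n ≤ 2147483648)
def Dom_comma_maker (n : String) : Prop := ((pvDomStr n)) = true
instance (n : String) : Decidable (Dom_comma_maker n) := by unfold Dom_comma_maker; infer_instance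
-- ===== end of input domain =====

-- B replaces A's three length%3-indexed left-to-right loops by one uniform right-to-left
-- grouping pass (peel the last 3 chars while more than 3 remain); objective: simpler.

-- ===== PORT A =====
-- literal transliteration of A on the code-point list; each 'for i in range(0, length)'
-- is a foldl over PySem.List.pyRange with the branch structure of the Python body.
def commaMakerA (cs : List Char) : List Char :=
  let length : Int := PySem.List.len cs
  if PySem.Int.mod length 3 = 0 then
    (PySem.List.pyRange 0 length 1).foldl (fun new_num i =>
      if i = 2 then PySem.List.slice cs (some 0) (some 3)
      else if PySem.Int.mod i 3 = 0 ∧ i ≠ 0 then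
        new_num ++ [','] ++ PySem.List.slice cs (some i) (some (i + 3))
      else new_num) []
  else if PySem.Int.mod length 3 = 1 then
    (PySem.List.pyRange 0 length 1).foldl (fun new_num i =>
      if i = 0 then [PySem.List.pyGetD cs 0 ' ']
      else if PySem.Int.mod (i + 2) 3 = 0 then
        new_num ++ [','] ++ PySem.List.slice cs (some i) (some (i + 3))
      else new_num) []
  else
    (PySem.List.pyRange 0 length 1).foldl (fun new_num i =>
      if i = 1 then PySem.List.slice cs (some 0) (some 2)
      else if PySem.Int.mod (i + 1) 3 = 0 then
        new_num ++ [','] ++ PySem.List.slice cs (some i) (some (i + 3))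
      else new_num) []


def comma_maker (n : String) : String := String.ofList (commaMakerA n.toList)

-- ===== PORT B =====
-- the while loop of Source B: append n[-3:] to chunks and shorten n to n[:-3] while len(n) > 3,
-- then append the remaining prefix; finally ",".join(reversed(chunks)).
def bChunks (cs : List Char) (chunks : List (List Char)) : List (List Char) :=
  if _h : 3 < cs.length then
    bChunks (PySem.List.slice cs none (some (-3)))
            (chunks ++ [PySem.List.slice cs (some (-3)) none])
  else chunks ++ [cs]
termination_by cs.length
decreasing_by
  rw [PySem.List.slice_to_neg_ofNat cs 3 (by omega)]
  simp [List.length_take]; omega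

def comma_maker_alt (n : String) : String :=
  String.ofList (PySem.Chars.join [','] (bChunks n.toList []).reverse)

-- ===== PRECONDITION & SPEC =====
def Spec_comma_maker (n : String) (out : String) : Prop := out = comma_maker_alt n
instance (n : String) (out : String) : Decidable (Spec_comma_maker n out) := by unfold Spec_comma_maker; infer_instance

-- ===== CLAIM (what is proved, stated in full; the proofs are below) =====
def Claim_equal_comma_maker : Prop := ∀ (n : String), Dom_comma_maker n → Spec_comma_maker n (comma_maker n)

-- ===== LEMMAS AND PROOFS =====

-- the right-to-left grouping both programs compute: peel the last 3 characters while
-- more than 3 remain, separating the groups with commas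
def gJoin (cs : List Char) : List Char :=
  if _h : 3 < cs.length then
    gJoin (cs.take (cs.length - 3)) ++ ',' :: cs.drop (cs.length - 3)
  else cs
termination_by cs.length
decreasing_by simp [List.length_take]; omega

lemma join_append_singleton (sep : List Char) (L : List (List Char)) (d : List Char) (h : L ≠ []) :
    PySem.Chars.join sep (L ++ [d]) = PySem.Chars.join sep L ++ sep ++ d := by
  induction L with
  | nil => simp at h
  | cons x xs ih =>
    cases xs with
    | nil => simp [PySem.Chars.join_singleton, PySem.Chars.join_cons_cons]
    | cons y ys =>
      simp only [List.cons_append] at ih ⊢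
      rw [PySem.Chars.join_cons_cons, PySem.Chars.join_cons_cons (rest := ys),
          ih (by simp)]
      simp [List.append_assoc]


lemma bChunks_acc_aux : ∀ m (cs : List Char), cs.length ≤ m →
    ∀ chunks, bChunks cs chunks = chunks ++ bChunks cs [] := by
  intro m
  induction m with
  | zero =>
    intro cs h chunks
    unfold bChunks
    rw [dif_neg (by omega), dif_neg (by omega)]
    simp
  | succ m ih =>
    intro cs h chunks
    unfold bChunks
    split_ifs with h3
    · have hlen : (PySem.List.slice cs none (some (-3))).length ≤ m := by
        rw [PySem.List.slice_to_neg_ofNat cs 3 (by omega)]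
        simp [List.length_take]; omega
      rw [ih _ hlen, ih _ hlen ([] ++ [PySem.List.slice cs (some (-3)) none])]
      simp
    · simp

lemma bChunks_acc (cs : List Char) (chunks : List (List Char)) :
    bChunks cs chunks = chunks ++ bChunks cs [] :=
  bChunks_acc_aux cs.length cs le_rfl chunks

lemma bChunks_ne_nil (cs : List Char) : bChunks cs [] ≠ [] := by
  unfold bChunks
  split_ifs with h3
  · rw [bChunks_acc]; simp
  · simp

lemma alt_eq_gJoin_aux : ∀ m (cs : List Char), cs.length ≤ m →
    PySem.Chars.join [','] (bChunks cs []).reverse = gJoin cs := by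
  intro m
  induction m with
  | zero =>
    intro cs h
    unfold bChunks gJoin
    rw [dif_neg (by omega), dif_neg (by omega)]
    simp [PySem.Chars.join_singleton]
  | succ m ih =>
    intro cs h
    unfold bChunks gJoin
    split_ifs with h3
    · have hto : PySem.List.slice cs none (some (-3)) = cs.take (cs.length - 3) :=
        PySem.List.slice_to_neg_ofNat cs 3 (by omega)
      have hfrom : PySem.List.slice cs (some (-3)) none = cs.drop (cs.length - 3) :=
        PySem.List.slice_from_neg_ofNat cs 3 (by omega)
      have hlen : (PySem.List.slice cs none (some (-3))).length ≤ m := by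
        rw [hto]; simp [List.length_take]; omega
      rw [bChunks_acc, List.nil_append, List.reverse_append, List.reverse_singleton,
          join_append_singleton _ _ _ (by simp [bChunks_ne_nil]),
          ih _ hlen, hto, hfrom]
      simp
    · simp [PySem.Chars.join_singleton]

lemma alt_eq_gJoin (cs : List Char) :
    PySem.Chars.join [','] (bChunks cs []).reverse = gJoin cs :=
  alt_eq_gJoin_aux cs.length cs le_rfl

lemma slice_append_eq (t d : List Char) (a b : Int) (ha : 0 ≤ a) (hb0 : 0 ≤ b)
    (hb : b ≤ (t.length : Int)) :
    PySem.List.slice (t ++ d) (some a) (some b) = PySem.List.slice t (some a) (some b) := by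
  rw [PySem.List.slice_toNat _ ha hb0, PySem.List.slice_toNat _ ha hb0]
  by_cases hab : a.toNat ≤ t.length
  · rw [List.drop_append_of_le_length hab,
        List.take_append_of_le_length (by simp [List.length_drop]; omega)]
  · rw [show b.toNat - a.toNat = 0 by omega]
    simp

lemma slice_append_tail (t d : List Char) (hd : d.length = 3) :
    PySem.List.slice (t ++ d) (some (t.length : Int)) (some ((t.length : Int) + 3)) = d := by
  rw [PySem.List.slice_toNat _ (by positivity) (by positivity)]
  rw [show ((t.length : Int) + 3).toNat = t.length + 3 by omega,
      Int.toNat_natCast, List.drop_left,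
      show t.length + 3 - t.length = 3 by omega, ← hd, List.take_length]



lemma commaA_small (cs : List Char) (h : cs.length ≤ 3) : commaMakerA cs = cs := by
  match cs, h with
  | [], _ => simp [commaMakerA, PySem.List.pyRange_one_eq_nil]
  | [a], _ => simp [commaMakerA, PySem.List.pyRange_one_cons, PySem.List.pyRange_one_eq_nil]
  | [a, b], _ =>
    simp [commaMakerA, PySem.List.pyRange_one_cons, PySem.List.pyRange_one_eq_nil]
    simp [PySem.List.slice, PySem.List.clampIdx]
  | [a, b, c], _ =>
    simp [commaMakerA, PySem.List.pyRange_one_cons, PySem.List.pyRange_one_eq_nil]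
    simp [PySem.List.slice, PySem.List.clampIdx]


lemma commaA_append0 (t d : List Char) (ht : 1 ≤ t.length) (hd : d.length = 3)
    (h0 : t.length % 3 = 0) :
    commaMakerA (t ++ d) = commaMakerA t ++ ',' :: d := by
  have me : ∀ a : Int, PySem.Int.mod a 3 = a % 3 :=
    fun a => PySem.Int.mod_eq_emod_of_pos (by norm_num)
  have hcast : ((t.length + 3 : Nat) : Int) = (t.length : Int) + 3 := by push_cast; ring
  have hrange : PySem.List.pyRange 0 ((t.length : Int) + 3) 1 =
      PySem.List.pyRange 0 (t.length : Int) 1 ++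
      [(t.length : Int), (t.length : Int) + 1, (t.length : Int) + 2] := by
    rw [PySem.List.pyRange_one_append 0 (t.length : Int) ((t.length : Int) + 3) (by positivity) (by omega)]
    congr 1
    rw [PySem.List.pyRange_one_cons (by omega), PySem.List.pyRange_one_cons (by omega),
        PySem.List.pyRange_one_cons (by omega), PySem.List.pyRange_one_eq_nil (by omega)]
    norm_num
    omega
  simp only [commaMakerA, PySem.List.len_eq, List.length_append, hd, me, hcast]
  rw [if_pos (by omega), if_pos (by omega)]
  rw [hrange, List.foldl_append]
  have hpref : List.foldl (fun new_num i =>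
        if i = 2 then PySem.List.slice (t ++ d) (some 0) (some 3)
        else if i % 3 = 0 ∧ i ≠ 0 then new_num ++ [','] ++ PySem.List.slice (t ++ d) (some i) (some (i + 3))
        else new_num) [] (PySem.List.pyRange 0 (t.length : Int) 1)
      = List.foldl (fun new_num i =>
        if i = 2 then PySem.List.slice t (some 0) (some 3)
        else if i % 3 = 0 ∧ i ≠ 0 then new_num ++ [','] ++ PySem.List.slice t (some i) (some (i + 3))
        else new_num) [] (PySem.List.pyRange 0 (t.length : Int) 1) := by
    apply PySem.List.foldl_congr_mem'
    intro i hi acc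
    rw [PySem.List.mem_pyRange_one] at hi
    by_cases h2i : i = 2
    · subst h2i
      exact slice_append_eq t d 0 3 (by norm_num) (by norm_num) (by omega)
    · rw [if_neg h2i, if_neg h2i]
      by_cases hcomma : i % 3 = 0 ∧ i ≠ 0
      · rw [if_pos hcomma, if_pos hcomma,
            slice_append_eq t d i (i + 3) (by omega) (by omega) (by omega)]
      · rw [if_neg hcomma, if_neg hcomma]
  rw [hpref]
  simp only [List.foldl_cons, List.foldl_nil]
  rw [if_neg (show ¬ ((t.length : Int) = 2) by omega),
      if_pos (show ((t.length : Int)) % 3 = 0 ∧ ((t.length : Int)) ≠ 0 by constructor <;> omega),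
      if_neg (show ¬ ((t.length : Int) + 1 = 2) by omega),
      if_neg (show ¬ (((t.length : Int) + 1) % 3 = 0 ∧ (t.length : Int) + 1 ≠ 0) by omega),
      if_neg (show ¬ ((t.length : Int) + 2 = 2) by omega),
      if_neg (show ¬ (((t.length : Int) + 2) % 3 = 0 ∧ (t.length : Int) + 2 ≠ 0) by omega),
      slice_append_tail t d hd]
  simp

lemma commaA_append1 (t d : List Char) (ht : 1 ≤ t.length) (hd : d.length = 3)
    (h1 : t.length % 3 = 1) :
    commaMakerA (t ++ d) = commaMakerA t ++ ',' :: d := by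
  have me : ∀ a : Int, PySem.Int.mod a 3 = a % 3 :=
    fun a => PySem.Int.mod_eq_emod_of_pos (by norm_num)
  have hcast : ((t.length + 3 : Nat) : Int) = (t.length : Int) + 3 := by push_cast; ring
  have hrange : PySem.List.pyRange 0 ((t.length : Int) + 3) 1 =
      PySem.List.pyRange 0 (t.length : Int) 1 ++
      [(t.length : Int), (t.length : Int) + 1, (t.length : Int) + 2] := by
    rw [PySem.List.pyRange_one_append 0 (t.length : Int) ((t.length : Int) + 3) (by positivity) (by omega)]
    congr 1
    rw [PySem.List.pyRange_one_cons (by omega), PySem.List.pyRange_one_cons (by omega),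
        PySem.List.pyRange_one_cons (by omega), PySem.List.pyRange_one_eq_nil (by omega)]
    norm_num
    omega
  simp only [commaMakerA, PySem.List.len_eq, List.length_append, hd, me, hcast]
  rw [if_neg (show ¬ (((t.length : Int) + 3) % 3 = 0) by omega),
      if_pos (show ((t.length : Int) + 3) % 3 = 1 by omega),
      if_neg (show ¬ (((t.length : Int)) % 3 = 0) by omega),
      if_pos (show ((t.length : Int)) % 3 = 1 by omega)]
  rw [hrange, List.foldl_append]
  have hpref : List.foldl (fun new_num i =>
        if i = 0 then [PySem.List.pyGetD (t ++ d) 0 ' ']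
        else if (i + 2) % 3 = 0 then new_num ++ [','] ++ PySem.List.slice (t ++ d) (some i) (some (i + 3))
        else new_num) [] (PySem.List.pyRange 0 (t.length : Int) 1)
      = List.foldl (fun new_num i =>
        if i = 0 then [PySem.List.pyGetD t 0 ' ']
        else if (i + 2) % 3 = 0 then new_num ++ [','] ++ PySem.List.slice t (some i) (some (i + 3))
        else new_num) [] (PySem.List.pyRange 0 (t.length : Int) 1) := by
    apply PySem.List.foldl_congr_mem'
    intro i hi acc
    rw [PySem.List.mem_pyRange_one] at hi
    by_cases h0i : i = 0
    · subst h0i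
      rw [if_pos rfl, if_pos rfl, PySem.List.pyGetD_zero, PySem.List.pyGetD_zero,
          List.getD_append _ _ _ _ (by omega)]
    · rw [if_neg h0i, if_neg h0i]
      by_cases hcomma : (i + 2) % 3 = 0
      · rw [if_pos hcomma, if_pos hcomma,
            slice_append_eq t d i (i + 3) (by omega) (by omega) (by omega)]
      · rw [if_neg hcomma, if_neg hcomma]
  rw [hpref]
  simp only [List.foldl_cons, List.foldl_nil]
  rw [if_neg (show ¬ ((t.length : Int) = 0) by omega),
      if_pos (show ((t.length : Int) + 2) % 3 = 0 by omega),
      if_neg (show ¬ ((t.length : Int) + 1 = 0) by omega),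
      if_neg (show ¬ (((t.length : Int) + 1 + 2) % 3 = 0) by omega),
      if_neg (show ¬ ((t.length : Int) + 2 = 0) by omega),
      if_neg (show ¬ (((t.length : Int) + 2 + 2) % 3 = 0) by omega),
      slice_append_tail t d hd]
  simp

lemma commaA_append2 (t d : List Char) (ht : 1 ≤ t.length) (hd : d.length = 3)
    (h2 : t.length % 3 = 2) :
    commaMakerA (t ++ d) = commaMakerA t ++ ',' :: d := by
  have me : ∀ a : Int, PySem.Int.mod a 3 = a % 3 :=
    fun a => PySem.Int.mod_eq_emod_of_pos (by norm_num)
  have hcast : ((t.length + 3 : Nat) : Int) = (t.length : Int) + 3 := by push_cast; ring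
  have hrange : PySem.List.pyRange 0 ((t.length : Int) + 3) 1 =
      PySem.List.pyRange 0 (t.length : Int) 1 ++
      [(t.length : Int), (t.length : Int) + 1, (t.length : Int) + 2] := by
    rw [PySem.List.pyRange_one_append 0 (t.length : Int) ((t.length : Int) + 3) (by positivity) (by omega)]
    congr 1
    rw [PySem.List.pyRange_one_cons (by omega), PySem.List.pyRange_one_cons (by omega),
        PySem.List.pyRange_one_cons (by omega), PySem.List.pyRange_one_eq_nil (by omega)]
    norm_num
    omega
  simp only [commaMakerA, PySem.List.len_eq, List.length_append, hd, me, hcast]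
  rw [if_neg (show ¬ (((t.length : Int) + 3) % 3 = 0) by omega),
      if_neg (show ¬ (((t.length : Int) + 3) % 3 = 1) by omega),
      if_neg (show ¬ (((t.length : Int)) % 3 = 0) by omega),
      if_neg (show ¬ (((t.length : Int)) % 3 = 1) by omega)]
  rw [hrange, List.foldl_append]
  have hpref : List.foldl (fun new_num i =>
        if i = 1 then PySem.List.slice (t ++ d) (some 0) (some 2)
        else if (i + 1) % 3 = 0 then new_num ++ [','] ++ PySem.List.slice (t ++ d) (some i) (some (i + 3))
        else new_num) [] (PySem.List.pyRange 0 (t.length : Int) 1)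
      = List.foldl (fun new_num i =>
        if i = 1 then PySem.List.slice t (some 0) (some 2)
        else if (i + 1) % 3 = 0 then new_num ++ [','] ++ PySem.List.slice t (some i) (some (i + 3))
        else new_num) [] (PySem.List.pyRange 0 (t.length : Int) 1) := by
    apply PySem.List.foldl_congr_mem'
    intro i hi acc
    rw [PySem.List.mem_pyRange_one] at hi
    by_cases h1i : i = 1
    · subst h1i
      exact slice_append_eq t d 0 2 (by norm_num) (by norm_num) (by omega)
    · rw [if_neg h1i, if_neg h1i]
      by_cases hcomma : (i + 1) % 3 = 0
      · rw [if_pos hcomma, if_pos hcomma,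
            slice_append_eq t d i (i + 3) (by omega) (by omega) (by omega)]
      · rw [if_neg hcomma, if_neg hcomma]
  rw [hpref]
  simp only [List.foldl_cons, List.foldl_nil]
  rw [if_neg (show ¬ ((t.length : Int) = 1) by omega),
      if_pos (show ((t.length : Int) + 1) % 3 = 0 by omega),
      if_neg (show ¬ ((t.length : Int) + 1 = 1) by omega),
      if_neg (show ¬ (((t.length : Int) + 1 + 1) % 3 = 0) by omega),
      if_neg (show ¬ ((t.length : Int) + 2 = 1) by omega),
      if_neg (show ¬ (((t.length : Int) + 2 + 1) % 3 = 0) by omega),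
      slice_append_tail t d hd]
  simp

lemma commaA_append (t d : List Char) (ht : 1 ≤ t.length) (hd : d.length = 3) :
    commaMakerA (t ++ d) = commaMakerA t ++ ',' :: d := by
  rcases (show t.length % 3 = 0 ∨ t.length % 3 = 1 ∨ t.length % 3 = 2 by omega) with h | h | h
  · exact commaA_append0 t d ht hd h
  · exact commaA_append1 t d ht hd h
  · exact commaA_append2 t d ht hd h


lemma commaA_eq_gJoin_aux : ∀ m (cs : List Char), cs.length ≤ m → commaMakerA cs = gJoin cs := by
  intro m
  induction m with
  | zero =>
    intro cs h
    rw [commaA_small cs (by omega), gJoin, dif_neg (by omega)]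
  | succ m ih =>
    intro cs h
    by_cases h3 : 3 < cs.length
    · have hld : (cs.drop (cs.length - 3)).length = 3 := by simp; omega
      calc commaMakerA cs
          = commaMakerA (cs.take (cs.length - 3) ++ cs.drop (cs.length - 3)) := by
            rw [List.take_append_drop]
        _ = commaMakerA (cs.take (cs.length - 3)) ++ ',' :: cs.drop (cs.length - 3) :=
            commaA_append _ _ (by simp; omega) hld
        _ = gJoin (cs.take (cs.length - 3)) ++ ',' :: cs.drop (cs.length - 3) := by
            rw [ih _ (by simp; omega)]
        _ = gJoin cs := by
            conv_rhs => rw [gJoin]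
            rw [dif_pos h3]
    · rw [commaA_small cs (by omega), gJoin, dif_neg h3]

lemma commaA_eq_gJoin (cs : List Char) : commaMakerA cs = gJoin cs :=
  commaA_eq_gJoin_aux cs.length cs le_rfl

-- ===== VERDICT (by name: the statement is the Claim_ definition above) =====
theorem comma_maker_spec : Claim_equal_comma_maker := by
  intro n _
  unfold Spec_comma_maker comma_maker comma_maker_alt
  rw [commaA_eq_gJoin, alt_eq_gJoin]
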